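-- pv_equiv track=rewrite | github.com/Saynu1/SPIRNOR-PROJECT | SPIRNOR_AI_PHASE10_ARITHMETIC_GPT.py | compute_input_values
-- ===== SOURCE A (Python) =====
-- def compute_input_values(seq_str):
--     """For each character, return the full number value it belongs to.
--     Only annotate digits BEFORE '=' (input operands, not answer).
--     Returns list of ints, same length as seq_str.
--     """
--     eq_pos = seq_str.index('=')
--     values = []
--     i = 0
--     while i < len(seq_str):
--         if i < eq_pos and seq_str[i].isdigit():
--             # Start of a number
--             j = i
--             while j < eq_pos and seq_str[j].isdigit():
--                 j += 1
--             num_val = int(seq_str[i:j])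
--             values.extend([num_val] * (j - i))
--             i = j
--         else:
--             values.append(0)
--             i += 1
--     return values
-- ===== SOURCE B (Python) =====
-- def compute_input_values(seq_str):
--     """For each character, return the full number value it belongs to.
--     Only annotate digits BEFORE '=' (input operands, not answer).
--     Returns list of ints, same length as seq_str.
--     """
--     eq_pos = seq_str.index('=')
--     values = []
--     buf = ''
--     for ch in seq_str[:eq_pos]:
--         if ch.isdigit():
--             buf += ch
--         else:
--             if buf:
--                 values.extend([int(buf)] * len(buf))
--                 buf = ''
--             values.append(0)
--     if buf:
--         values.extend([int(buf)] * len(buf))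
--     values.extend([0] * (len(seq_str) - eq_pos))
--     return values
-- ===== Notes on version B (the rewrite author's own statement) =====
-- stated objective: alternative
-- what changed: Replaced A's index-cursor loop with an inner digit-run rescan and slicing by a single buffered character pass over the operand prefix that accumulates the current digit run and flushes it on run boundaries.
import Mathlib
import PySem

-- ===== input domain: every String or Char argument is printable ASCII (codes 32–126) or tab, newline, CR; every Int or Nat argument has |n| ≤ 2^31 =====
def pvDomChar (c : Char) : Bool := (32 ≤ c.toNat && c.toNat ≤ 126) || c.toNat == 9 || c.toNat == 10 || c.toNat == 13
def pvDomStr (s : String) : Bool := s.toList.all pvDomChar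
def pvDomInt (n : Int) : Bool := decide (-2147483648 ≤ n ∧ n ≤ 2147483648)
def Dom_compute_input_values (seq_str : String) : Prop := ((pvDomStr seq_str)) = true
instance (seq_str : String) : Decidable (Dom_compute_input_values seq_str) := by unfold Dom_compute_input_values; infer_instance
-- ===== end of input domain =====

-- B replaces A's index cursor with inner digit-run scan by a single character-level
-- pass over the prefix before the equals sign, carrying a pending digit-buffer that
-- is flushed on run boundaries (alternative decomposition).

-- int(run) for a run of digits; exact here: both programs only call int() on a
-- nonempty all-ASCII-digit string, where int() returns and ofChars? is some.
def pyIntDigits (cs : List Char) : Int := (PySem.Int.ofChars? cs).getD 0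

-- ===== PORT A =====
-- inner while loop: `while j < eq_pos and seq_str[j].isdigit(): j += 1`
-- (index via getD: whenever evaluated, j < eq_pos ≤ len, so it equals seq_str[j];
--  the first Nat argument is fuel — eq_pos steps always suffice, see aInner_char)
def aInner (cs : List Char) (eqPos : Nat) : Nat → Nat → Nat
  | 0, j => j
  | fuel+1, j =>
    if j < eqPos ∧ PySem.Chars.isdigit (cs.getD j ' ') = true then
      aInner cs eqPos fuel (j+1)
    else j

-- outer while loop of A (first Nat argument is fuel — len(seq_str) steps suffice,
-- since i strictly increases each iteration)
def aLoop (cs : List Char) (eqPos : Nat) : Nat → Nat → List Int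
  | 0, _ => []
  | fuel+1, i =>
    if i < cs.length then
      if i < eqPos ∧ PySem.Chars.isdigit (cs.getD i ' ') = true then
        let j := aInner cs eqPos eqPos i
        let numVal := pyIntDigits (PySem.List.slice cs (some (i : Int)) (some (j : Int)))
        List.replicate (j - i) numVal ++ aLoop cs eqPos fuel j
      else 0 :: aLoop cs eqPos fuel (i+1)
    else []

def compute_input_values (seq_str : String) : List Int :=
  match PySem.List.index? seq_str.toList '=' with
  | none => []          -- Python raises ValueError here; excluded by Pre_
  | some eqPos => aLoop seq_str.toList eqPos seq_str.toList.length 0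

-- ===== PORT B =====
-- B's for-loop over seq_str[:eq_pos] with the pending buffer `buf`; the final
-- flush `if buf: …` is the base case.
def bFlush (buf : List Char) : List Int :=
  if buf.isEmpty then [] else List.replicate buf.length (pyIntDigits buf)

def bLoop (rest buf : List Char) : List Int :=
  match rest with
  | [] => bFlush buf
  | c :: rest' =>
    if PySem.Chars.isdigit c = true then bLoop rest' (buf ++ [c])
    else bFlush buf ++ 0 :: bLoop rest' []

def compute_input_values_alt (seq_str : String) : List Int :=
  match PySem.List.index? seq_str.toList '=' with
  | none => []          -- Python raises ValueError here; excluded by Pre_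
  | some eqPos =>
    bLoop (PySem.List.slice seq_str.toList none (some (eqPos : Int))) []
      ++ List.replicate (seq_str.toList.length - eqPos) 0

-- ===== PRECONDITION & SPEC =====
-- A (and B) raise ValueError when the string contains no equals sign; Pre_ excludes exactly those inputs.
def Pre_compute_input_values (seq_str : String) : Prop := '=' ∈ seq_str.toList
instance (seq_str : String) : Decidable (Pre_compute_input_values seq_str) := by
  unfold Pre_compute_input_values; infer_instance

def pvWitness_compute_input_values : String := "12+3=15"

def Spec_compute_input_values (seq_str : String) (out : List Int) : Prop := out = compute_input_values_alt seq_str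
instance (seq_str : String) (out : List Int) : Decidable (Spec_compute_input_values seq_str out) := by unfold Spec_compute_input_values; infer_instance

-- ===== CLAIM (what is proved, stated in full; the proofs are below) =====
def Claim_equal_compute_input_values : Prop := ∀ (seq_str : String), Dom_compute_input_values seq_str → Pre_compute_input_values seq_str → Spec_compute_input_values seq_str (compute_input_values seq_str)

-- ===== LEMMAS AND PROOFS =====

-- tail-processing of the part after a flushed run (proof-only helper)
def bTail : List Char → List Int
  | [] => []
  | _ :: u' => 0 :: bLoop u' []

-- the pending buffer absorbs exactly the leading digit run
theorem bLoop_acc (t : List Char) : ∀ buf : List Char,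
    bLoop t buf = bFlush (buf ++ t.takeWhile PySem.Chars.isdigit)
      ++ bTail (t.dropWhile PySem.Chars.isdigit) := by
  induction t with
  | nil => intro buf; simp [bLoop, bTail]
  | cons c t' ih =>
    intro buf
    by_cases hd : PySem.Chars.isdigit c = true
    · simp [bLoop, hd, ih (buf ++ [c])]
    · simp [bLoop, hd, bTail]

theorem bLoop_eq_bTail (p : Char → Bool) (t : List Char) (hp : p = PySem.Chars.isdigit) :
    bLoop (t.dropWhile p) [] = bTail (t.dropWhile p) := by
  cases hu : t.dropWhile p with
  | nil => simp [bLoop, bTail, bFlush]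
  | cons c u' =>
    have hc : p c = false := by
      have := List.head?_dropWhile_not p t
      rw [hu] at this; simpa using this
    rw [hp] at hc
    simp [bLoop, bTail, hc, bFlush]

-- the inner while loop advances past exactly the digit run inside the prefix
theorem aInner_char (cs : List Char) (eqPos : Nat) :
    ∀ fuel j, eqPos ≤ cs.length → j ≤ eqPos → eqPos - j ≤ fuel →
    aInner cs eqPos fuel j
      = j + (((cs.take eqPos).drop j).takeWhile PySem.Chars.isdigit).length := by
  intro fuel
  induction fuel with
  | zero =>
    intro j hle hj hf
    have hje : j = eqPos := by omega
    rw [aInner, hje, List.drop_eq_nil_of_le (by simp [List.length_take])]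
    simp
  | succ fuel ih =>
    intro j hle hj hf
    rw [aInner]
    by_cases h : j < eqPos ∧ PySem.Chars.isdigit (cs.getD j ' ') = true
    · have hjlen : j < cs.length := lt_of_lt_of_le h.1 hle
      have hjpre : j < (cs.take eqPos).length := by simp [List.length_take]; omega
      have hget : (cs.take eqPos)[j]'hjpre = cs[j]'hjlen := List.getElem_take
      have hdig : PySem.Chars.isdigit (cs[j]'hjlen) = true := by
        have h2 := h.2
        rwa [List.getD_eq_getElem cs ' ' hjlen] at h2
      rw [if_pos h, ih (j+1) hle (by omega) (by omega),
          List.drop_eq_getElem_cons hjpre, List.takeWhile_cons, hget, hdig]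
      simp; omega
    · rw [if_neg h]
      rcases Nat.lt_or_ge j eqPos with hjlt | hge
      · have hjlen : j < cs.length := lt_of_lt_of_le hjlt hle
        have hjpre : j < (cs.take eqPos).length := by simp [List.length_take]; omega
        have hget : (cs.take eqPos)[j]'hjpre = cs[j]'hjlen := List.getElem_take
        have hdig : PySem.Chars.isdigit (cs[j]'hjlen) = false := by
          have h2 : ¬ PySem.Chars.isdigit (cs.getD j ' ') = true := by
            intro hc; exact h ⟨hjlt, hc⟩
          rw [List.getD_eq_getElem cs ' ' hjlen] at h2
          simpa using h2
        rw [List.drop_eq_getElem_cons hjpre, List.takeWhile_cons, hget, hdig]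
        simp
      · have : (cs.take eqPos).drop j = [] :=
          List.drop_eq_nil_of_le (by simp [List.length_take]; omega)
        rw [this]; simp

-- past eq_pos (and past the end) A appends only zeros
theorem aLoop_after (cs : List Char) (eqPos : Nat) :
    ∀ fuel i, cs.length - i ≤ fuel → eqPos ≤ i →
    aLoop cs eqPos fuel i = List.replicate (cs.length - i) 0 := by
  intro fuel
  induction fuel with
  | zero =>
    intro i hf hi
    rw [aLoop, Nat.sub_eq_zero_of_le (by omega)]
    rfl
  | succ fuel ih =>
    intro i hf hi
    by_cases hil : i < cs.length
    · rw [aLoop, if_pos hil, if_neg (by intro hc; omega)]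
      rw [ih (i+1) (by omega) (by omega)]
      have : cs.length - i = (cs.length - (i+1)) + 1 := by omega
      rw [this, List.replicate_succ]
    · rw [aLoop, if_neg hil, Nat.sub_eq_zero_of_le (by omega)]
      rfl

-- main correspondence: from position i ≤ eq_pos with enough fuel, A's loop equals
-- B's buffered pass over the rest of the prefix followed by the zero tail
theorem aLoop_eq_bLoop (cs : List Char) (eqPos : Nat) (hlt : eqPos < cs.length) :
    ∀ fuel i, cs.length - i ≤ fuel → i ≤ eqPos →
    aLoop cs eqPos fuel i
      = bLoop ((cs.take eqPos).drop i) [] ++ List.replicate (cs.length - eqPos) 0 := by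
  have hle : eqPos ≤ cs.length := le_of_lt hlt
  have hprelen : (cs.take eqPos).length = eqPos := by simp [List.length_take]; omega
  intro fuel
  induction fuel with
  | zero =>
    intro i hf hi
    omega   -- impossible: i ≤ eqPos < cs.length yet cs.length ≤ i
  | succ fuel ih =>
    intro i hf hi
    rcases Nat.eq_or_lt_of_le hi with hieq | hilt
    · rw [hieq, List.drop_eq_nil_of_le (le_of_eq hprelen)]
      simp [bLoop, bFlush]
      exact aLoop_after cs eqPos (fuel+1) eqPos (by omega) le_rfl
    · have hilen : i < cs.length := lt_of_lt_of_le hilt hle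
      have hipre : i < (cs.take eqPos).length := by omega
      have hget : (cs.take eqPos)[i]'hipre = cs[i]'hilen := List.getElem_take
      have hcons : (cs.take eqPos).drop i
          = cs[i]'hilen :: (cs.take eqPos).drop (i+1) := by
        rw [List.drop_eq_getElem_cons hipre, hget]
      by_cases hd : PySem.Chars.isdigit (cs[i]'hilen) = true
      · -- digit run
        have hgetD : cs.getD i ' ' = cs[i]'hilen := List.getD_eq_getElem cs ' ' hilen
        have hcond : i < eqPos ∧ PySem.Chars.isdigit (cs.getD i ' ') = true :=
          ⟨hilt, by rw [hgetD]; exact hd⟩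
        set p := PySem.Chars.isdigit with hp
        set r := (((cs.take eqPos).drop i).takeWhile p) with hr
        set u := (((cs.take eqPos).drop i).dropWhile p) with hu
        have hru : r ++ u = (cs.take eqPos).drop i := List.takeWhile_append_dropWhile
        have hdlen : r.length ≤ eqPos - i := by
          have h0 : r.length ≤ ((cs.take eqPos).drop i).length :=
            (List.takeWhile_prefix p).length_le
          simp [hprelen] at h0; omega
        have hrcons : r = cs[i]'hilen :: (((cs.take eqPos).drop (i+1)).takeWhile p) := by
          rw [hr, hcons, List.takeWhile_cons, hd]
          simp
        have hucons : u = ((cs.take eqPos).drop (i+1)).dropWhile p := by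
          rw [hu, hcons, List.dropWhile_cons, hd]; simp
        have hrlen1 : 1 ≤ r.length := by rw [hrcons]; simp
        have hj : aInner cs eqPos eqPos i = i + r.length :=
          aInner_char cs eqPos eqPos i hle (le_of_lt hilt) (by omega)
        -- A's slice is exactly the run r
        have hslice : PySem.List.slice cs (some (i : Int)) (some ((i + r.length : Nat) : Int))
            = r := by
          rw [PySem.List.slice_natCast]
          have h1 : (cs.take eqPos).drop i = (cs.drop i).take (eqPos - i) := List.drop_take
          have h2 : ((cs.drop i).take (eqPos - i)).take r.length = (cs.drop i).take r.length := by
            rw [List.take_take, Nat.min_eq_left hdlen]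
          have h3 : ((cs.take eqPos).drop i).take r.length = r := by
            rw [← hru, List.take_left]
          rw [Nat.add_sub_cancel_left, ← h2, ← h1, h3]
        -- drop past the run
        have hdrop : (cs.take eqPos).drop (i + r.length) = u := by
          rw [← List.drop_drop, ← hru, List.drop_left]
        have hrne : ([cs[i]'hilen] ++ ((cs.take eqPos).drop (i+1)).takeWhile p) = r := by
          rw [hrcons]; rfl
        -- B side: one step into the buffer, then drain the run via bLoop_acc
        have hB : bLoop ((cs.take eqPos).drop i) []
            = List.replicate r.length (pyIntDigits r) ++ bLoop u [] := by
          rw [hcons, bLoop, if_pos hd, bLoop_acc, ← hp]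
          have h1 : ([] : List Char) ++ [cs[i]'hilen] = [cs[i]'hilen] := rfl
          rw [h1, hrne, hucons, bLoop_eq_bTail p ((cs.take eqPos).drop (i+1)) hp.symm]
          have h2 : bFlush r = List.replicate r.length (pyIntDigits r) := by
            rw [bFlush, hrcons]
            simp
          rw [h2]
        rw [aLoop, if_pos hilen, if_pos hcond]
        simp only [hj, hslice, Nat.add_sub_cancel_left]
        rw [ih (i + r.length) (by omega) (by omega), hdrop, hB, List.append_assoc]
      · -- non-digit: single zero
        have hgetD : cs.getD i ' ' = cs[i]'hilen := List.getD_eq_getElem cs ' ' hilen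
        have hcond : ¬ (i < eqPos ∧ PySem.Chars.isdigit (cs.getD i ' ') = true) := by
          intro hc; rw [hgetD] at hc; exact hd hc.2
        rw [aLoop, if_pos hilen, if_neg hcond, ih (i+1) (by omega) (by omega)]
        rw [hcons, bLoop]
        simp [hd, bFlush]

-- ===== VERDICT (by name: the statement is the Claim_ definition above) =====
theorem compute_input_values_spec : Claim_equal_compute_input_values := by
  intro s _hdom hpre
  unfold Spec_compute_input_values compute_input_values compute_input_values_alt
  cases hidx : PySem.List.index? s.toList '=' with
  | none => exact absurd hpre ((PySem.List.index?_eq_none_iff _ _).mp hidx)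
  | some eqPos =>
    obtain ⟨hlt, -, -⟩ := PySem.List.getElem_of_index?_eq_some hidx
    show aLoop s.toList eqPos s.toList.length 0
      = bLoop (PySem.List.slice s.toList none (some (eqPos : Int))) []
        ++ List.replicate (s.toList.length - eqPos) 0
    rw [PySem.List.slice_to_natCast]
    have h := aLoop_eq_bLoop s.toList eqPos hlt s.toList.length 0 (by omega) (Nat.zero_le _)
    simpa using h
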